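-- pv_equiv track=rewrite | github.com/Alvaropz/Python_problems_BinarySearch | 2. Medium/factorial_sum/factorial_sum.py | factorial_sum
-- ===== SOURCE A (Python) =====
-- def factorial_sum(n):
--     number_list = []
--     for number in range(1, n+1):
--         temp_factor = number
--         for factor in range(1, number):
--             temp_factor = temp_factor * (number - factor)
--         if temp_factor > n:
--             break
--         number_list.append(temp_factor)
--     for number in number_list[::-1]:
--         if n - number >= 0:
--             n -= number
--         if n == 0:
--             return True
--     return False
-- ===== SOURCE B (Python) =====
-- def factorial_sum(n):
--     if n <= 0:
--         return False
--     i = 2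
--     while n > 0:
--         if n % i > 1:
--             return False
--         n //= i
--         i += 1
--     return True
-- ===== Notes on version B (the rewrite author's own statement) =====
-- stated objective: faster
-- what changed: Replaces A's factorial-list construction (each factorial recomputed by an inner product loop) plus greedy descending subtraction with a single factorial-base digit-extraction loop (repeated mod/floordiv by successive divisors starting at two), rejecting as soon as a digit is too large; equivalent because the factorial number system is unique and greedy subtraction picks exactly its digits.
import Mathlib
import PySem

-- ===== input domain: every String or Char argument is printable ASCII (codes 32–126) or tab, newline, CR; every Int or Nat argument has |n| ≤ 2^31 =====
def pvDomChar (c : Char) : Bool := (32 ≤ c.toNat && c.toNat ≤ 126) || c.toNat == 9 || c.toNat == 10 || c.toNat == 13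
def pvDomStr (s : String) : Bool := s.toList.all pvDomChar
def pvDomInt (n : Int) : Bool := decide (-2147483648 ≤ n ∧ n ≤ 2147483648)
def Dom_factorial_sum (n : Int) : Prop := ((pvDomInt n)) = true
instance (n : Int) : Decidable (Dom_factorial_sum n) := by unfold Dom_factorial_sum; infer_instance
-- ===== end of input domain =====

-- B replaces A's factorial-list building + greedy descending subtraction by factorial-base
-- digit extraction (n % i, n //= i for successive divisors i): a different algorithm with
-- fewer arithmetic operations per call.

-- ===== PORT A =====
-- inner loop: temp_factor = number; for factor in range(1, number): temp_factor *= (number - factor)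
def pvInnerA (number : Int) : Int :=
  (PySem.List.pyRange 1 number 1).foldl (fun t factor => t * (number - factor)) number

-- 'for number in range(1, n+1): … if temp_factor > n: break; number_list.append(temp_factor)'
-- ported as counter recursion (same iteration, break returns the accumulator)
def pvBuildA (n number : Int) (acc : List Int) : List Int :=
  if number ≤ n then
    let temp := pvInnerA number
    if temp > n then acc
    else pvBuildA n (number + 1) (acc ++ [temp])
  else acc
termination_by (n + 1 - number).toNat
decreasing_by omega

-- 'for number in number_list[::-1]: if n - number >= 0: n -= number; if n == 0: return True'
def pvGreedyA : List Int → Int → Bool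
  | [], _ => false
  | number :: rest, n =>
    let n1 := if n - number ≥ 0 then n - number else n
    if n1 = 0 then true else pvGreedyA rest n1

-- number_list[::-1] is List.reverse (PySem.List.slice?_none_none_neg_one)
def factorial_sum (n : Int) : Bool :=
  pvGreedyA (pvBuildA n 1 []).reverse n

-- ===== PORT B =====
-- B's while loop; the divisor i (starting at 2, incremented each step) is carried as j with
-- i = j + 2 so termination is on n, which strictly decreases (n // i < n for n ≥ 1, i ≥ 2).
-- n and i are positive throughout, so Python's % and // are Nat.mod / Nat.div here (exact).
def pvLoopB (j : Nat) : Nat → Bool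
  | 0 => true
  | (m+1) => if (m+1) % (j+2) > 1 then false else pvLoopB (j+1) ((m+1) / (j+2))
termination_by m => m
decreasing_by exact Nat.div_lt_self (Nat.succ_pos _) (by omega)

def factorial_sum_alt (n : Int) : Bool :=
  if n ≤ 0 then false else pvLoopB 0 n.toNat

-- ===== PRECONDITION & SPEC =====
def Spec_factorial_sum (n : Int) (out : Bool) : Prop := out = factorial_sum_alt n
instance (n : Int) (out : Bool) : Decidable (Spec_factorial_sum n out) := by unfold Spec_factorial_sum; infer_instance

-- ===== CLAIM (what is proved, stated in full; the proofs are below) =====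
def Claim_equal_factorial_sum : Prop := ∀ (n : Int), Dom_factorial_sum n → Spec_factorial_sum n (factorial_sum n)

-- ===== LEMMAS AND PROOFS =====

-- pvF k = (k+1)!  (the k-th factorial A's list holds, 0-indexed)
def pvF : Nat → Nat
  | 0 => 1
  | (k+1) => pvF k * (k+2)

-- product of the divisors j+2, …, j+d+1 that pvLoopB consumes in d steps
def pvPf : Nat → Nat → Nat
  | _, 0 => 1
  | j, (d+1) => (j+2) * pvPf (j+1) d

-- A's greedy pass over the descending factorial list [pvF (k-1), …, pvF 0], on Nat
def pvGk : Nat → Nat → Bool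
  | 0, _ => false
  | (k+1), m =>
    let m' := if pvF k ≤ m then m - pvF k else m
    if m' = 0 then true else pvGk k m'

theorem pvF_eq (k : Nat) : pvF k = Nat.factorial (k+1) := by
  induction k with
  | zero => rfl
  | succ k ih => simp [pvF, ih, Nat.factorial_succ]; ring

theorem pvF_pos (k : Nat) : 0 < pvF k := by rw [pvF_eq]; exact Nat.factorial_pos _

theorem pvF_ge (k : Nat) : k + 1 ≤ pvF k := by rw [pvF_eq]; exact Nat.self_le_factorial _

theorem pvF_mono {a b : Nat} (h : a ≤ b) : pvF a ≤ pvF b := by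
  rw [pvF_eq, pvF_eq]; exact Nat.factorial_le (by omega)

theorem pvPf_pos (d : Nat) : ∀ j, 0 < pvPf j d := by
  induction d with
  | zero => intro j; simp [pvPf]
  | succ d ih => intro j; rw [pvPf]; exact Nat.mul_pos (by omega) (ih _)

theorem pvPf_succ_right (d : Nat) : ∀ j, pvPf j (d+1) = pvPf j d * (j+d+2) := by
  induction d with
  | zero => intro j; simp [pvPf]
  | succ d ih => intro j; rw [pvPf, ih (j+1), pvPf]; ring

theorem pvPf_zero_eq (k : Nat) : pvPf 0 k = pvF k := by
  induction k with
  | zero => rfl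
  | succ k ih => rw [pvPf_succ_right, ih, pvF]; ring

theorem pvLoopB_pos (j m : Nat) (h : 0 < m) :
    pvLoopB j m = if m % (j+2) > 1 then false else pvLoopB (j+1) (m / (j+2)) := by
  cases m with
  | zero => omega
  | succ m => rw [pvLoopB]

-- adding the place value pvPf j d (a top digit 1) does not change pvLoopB's verdict
theorem pvLoopB_add_top (d : Nat) : ∀ j m, m < pvPf j d →
    pvLoopB j (m + pvPf j d) = pvLoopB j m := by
  induction d with
  | zero =>
    intro j m hm
    have : m = 0 := by simpa [pvPf] using hm
    subst this
    have he : (0 : Nat) + pvPf j 0 = 1 := by simp [pvPf]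
    rw [he, pvLoopB_pos j 1 (by omega)]
    have h1 : (1 : Nat) % (j+2) = 1 := Nat.mod_eq_of_lt (by omega)
    have h2 : (1 : Nat) / (j+2) = 0 := Nat.div_eq_of_lt (by omega)
    have h3 : pvLoopB (j+1) 0 = true := by rw [pvLoopB]
    have h4 : pvLoopB j 0 = true := by rw [pvLoopB]
    simp [h1, h2, h3, h4]
  | succ d ih =>
    intro j m hm
    have hP : 0 < pvPf (j+1) d := pvPf_pos d (j+1)
    have hpf : pvPf j (d+1) = (j+2) * pvPf (j+1) d := rfl
    have hmod : (m + pvPf j (d+1)) % (j+2) = m % (j+2) := by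
      rw [hpf]; exact Nat.add_mul_mod_self_left m (j+2) (pvPf (j+1) d)
    have hdiv : (m + pvPf j (d+1)) / (j+2) = m / (j+2) + pvPf (j+1) d := by
      rw [hpf]; exact Nat.add_mul_div_left m (pvPf (j+1) d) (by omega)
    rw [pvLoopB_pos j (m + pvPf j (d+1)) (by rw [hpf]; positivity), hmod, hdiv]
    rcases Nat.eq_zero_or_pos m with hm0 | hm0
    · subst hm0
      have h0 : pvLoopB (j+1) (pvPf (j+1) d) = true := by
        have := ih (j+1) 0 hP
        simp only [Nat.zero_add] at this
        rw [this, pvLoopB]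
      have hB0 : pvLoopB j 0 = true := by rw [pvLoopB]
      simp [h0, hB0]
    · rw [pvLoopB_pos j m hm0]
      by_cases hr : m % (j+2) > 1
      · simp [hr]
      · simp only [hr, ite_false]
        have hq : m / (j+2) < pvPf (j+1) d := by
          rw [Nat.div_lt_iff_lt_mul (by omega : 0 < j+2)]
          calc m < pvPf j (d+1) := hm
            _ = pvPf (j+1) d * (j+2) := by rw [hpf]; ring
        exact ih (j+1) (m / (j+2)) hq

-- a top digit ≥ 2 makes pvLoopB reject
theorem pvLoopB_top_two (d : Nat) : ∀ j m, 2 * pvPf j d ≤ m → m < pvPf j (d+1) →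
    pvLoopB j m = false := by
  induction d with
  | zero =>
    intro j m h1 h2
    simp only [pvPf] at h1 h2
    rw [pvLoopB_pos j m (by omega)]
    have : m % (j+2) = m := Nat.mod_eq_of_lt (by omega)
    rw [this]
    simp [show m > 1 by omega]
  | succ d ih =>
    intro j m h1 h2
    have hP : 0 < pvPf (j+1) d := pvPf_pos d (j+1)
    have hpf : pvPf j (d+1) = (j+2) * pvPf (j+1) d := rfl
    have hpf2 : pvPf j (d+2) = (j+2) * pvPf (j+1) (d+1) := rfl
    have hPP : 0 < pvPf j (d+1) := pvPf_pos _ _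
    rw [pvLoopB_pos j m (by omega)]
    by_cases hr : m % (j+2) > 1
    · simp [hr]
    · simp only [hr, ite_false]
      apply ih (j+1)
      · rw [Nat.le_div_iff_mul_le (by omega : 0 < j+2)]
        calc 2 * pvPf (j+1) d * (j+2) = 2 * ((j+2) * pvPf (j+1) d) := by ring
          _ = 2 * pvPf j (d+1) := by rw [hpf]
          _ ≤ m := h1
      · rw [Nat.div_lt_iff_lt_mul (by omega : 0 < j+2)]
        calc m < pvPf j (d+2) := h2
          _ = pvPf (j+1) (d+1) * (j+2) := by rw [hpf2]; ring

-- greedy fails when m is at least the next factorial (the remaining list cannot cover m)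
theorem pvGk_big (k : Nat) : ∀ m, pvF k ≤ m → pvGk k m = false := by
  induction k with
  | zero => intro m _; rfl
  | succ k ih =>
    intro m hm
    have hk : 0 < pvF k := pvF_pos k
    have hF : pvF (k+1) = pvF k * (k+2) := rfl
    have h2 : 2 * pvF k ≤ m := by
      have : 2 * pvF k ≤ pvF k * (k+2) := by nlinarith
      omega
    simp only [pvGk]
    rw [if_pos (by omega : pvF k ≤ m)]
    rw [if_neg (by omega : ¬ (m - pvF k = 0))]
    exact ih (m - pvF k) (by omega)

-- main bridge: greedy over [pvF (k-1), …, pvF 0] = factorial-base digit check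
theorem pvGk_eq_loopB (k : Nat) : ∀ m, 1 ≤ m → m < pvF k → pvGk k m = pvLoopB 0 m := by
  induction k with
  | zero => intro m h1 h2; simp [pvF] at h2; omega
  | succ k ih =>
    intro m h1 h2
    have hk : 0 < pvF k := pvF_pos k
    have hpf : pvPf 0 k = pvF k := pvPf_zero_eq k
    have hF : pvF (k+1) = pvF k * (k+2) := rfl
    simp only [pvGk]
    by_cases hle : pvF k ≤ m
    · rw [if_pos hle]
      rcases Nat.lt_or_ge m (2 * pvF k) with hlt | hge
      · -- top digit is exactly 1
        by_cases hz : m - pvF k = 0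
        · rw [if_pos hz]
          have hm : m = pvF k := by omega
          have := pvLoopB_add_top k 0 0 (by omega)
          simp only [Nat.zero_add] at this
          rw [hm, ← hpf, this, pvLoopB]
        · rw [if_neg hz]
          have hsub : m - pvF k < pvF k := by omega
          have h1' : 1 ≤ m - pvF k := by omega
          rw [ih (m - pvF k) h1' hsub]
          have := pvLoopB_add_top k 0 (m - pvF k) (by omega)
          rw [hpf] at this
          rw [← this]
          congr 1
          omega
      · -- top digit ≥ 2: both sides false
        rw [if_neg (by omega : ¬ (m - pvF k = 0))]
        rw [pvGk_big k (m - pvF k) (by omega)]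
        have := pvLoopB_top_two k 0 m (by rw [hpf]; omega)
          (by rw [pvPf_succ_right, hpf]; simpa [hF, Nat.mul_comm] using h2)
        rw [this]
    · rw [if_neg hle, if_neg (by omega : ¬ (m = 0))]
      exact ih m h1 (by omega)

-- the inner product loop computes t * (mI - a)!
theorem pvFoldl_fact (d : Nat) : ∀ (a t mI : Int), mI - a = (d : Int) →
    (PySem.List.pyRange a mI 1).foldl (fun t factor => t * (mI - factor)) t
      = t * (Nat.factorial d : Int) := by
  induction d with
  | zero =>
    intro a t mI hd
    rw [PySem.List.pyRange_one_eq_nil (by omega)]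
    simp [Nat.factorial]
  | succ d ih =>
    intro a t mI hd
    rw [PySem.List.pyRange_one_cons (by omega : a < mI)]
    simp only [List.foldl_cons]
    rw [ih (a+1) (t * (mI - a)) mI (by omega)]
    have hma : mI - a = ((d : Int) + 1) := by omega
    rw [hma, Nat.factorial_succ]
    push_cast
    ring

theorem pvInnerA_eq (k : Nat) : pvInnerA ((k+1 : Nat) : Int) = (pvF k : Int) := by
  unfold pvInnerA
  rw [pvFoldl_fact k 1 ((k+1 : Nat) : Int) ((k+1 : Nat) : Int) (by push_cast; ring)]
  rw [pvF_eq, Nat.factorial_succ]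
  push_cast
  ring

-- the builder produces exactly [pvF 0, …, pvF J] where J is maximal with pvF J ≤ N
theorem pvBuildA_inv (N J : Nat) (hJ1 : pvF J ≤ N) (hJ2 : N < pvF (J+1)) :
    ∀ (d a : Nat) (acc : List Int), 1 ≤ a → a + d = J + 2 →
    pvBuildA (N : Int) (a : Int) acc
      = acc ++ (List.range' a d).map (fun k => (pvF (k-1) : Int)) := by
  intro d
  induction d with
  | zero =>
    intro a acc h1 h2
    have ha : a = J + 2 := by omega
    subst ha
    by_cases hg : (J + 2 : Nat) ≤ N
    · rw [pvBuildA, if_pos (by exact_mod_cast hg : ((J + 2 : Nat) : Int) ≤ (N : Int))]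
      have h12 : J + 1 + 1 = J + 2 := rfl
      have hI : pvInnerA ((J + 2 : Nat) : Int) = (pvF (J + 1) : Int) := by
        rw [← h12]; exact pvInnerA_eq (J + 1)
      simp only [hI]
      rw [if_pos (by exact_mod_cast hJ2 : (pvF (J + 1) : Int) > (N : Int))]
      simp
    · rw [pvBuildA, if_neg (by push_cast; omega : ¬ ((J + 2 : Nat) : Int) ≤ (N : Int))]
      simp
  | succ d ih =>
    intro a acc h1 h2
    cases a with
    | zero => omega
    | succ a' =>
      have hFa : pvF a' ≤ N := le_trans (pvF_mono (by omega : a' ≤ J)) hJ1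
      have haN : a' + 1 ≤ N := le_trans (pvF_ge a') hFa
      rw [pvBuildA, if_pos (by exact_mod_cast haN : ((a' + 1 : Nat) : Int) ≤ (N : Int))]
      simp only [pvInnerA_eq a']
      rw [if_neg (by omega : ¬ (pvF a' : Int) > (N : Int))]
      have hc : ((a' + 1 : Nat) : Int) + 1 = ((a' + 2 : Nat) : Int) := by omega
      rw [hc, ih (a' + 2) (acc ++ [(pvF a' : Int)]) (by omega) (by omega)]
      rw [List.range'_succ]
      simp

-- A's Int greedy over the reversed list = pvGk on Nat
theorem pvGreedyA_eq_gk (k : Nat) : ∀ m : Nat,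
    pvGreedyA (((List.range' 1 k).map (fun i => (pvF (i-1) : Int))).reverse) (m : Int)
      = pvGk k m := by
  induction k with
  | zero => intro m; rfl
  | succ k ih =>
    intro m
    rw [List.range'_1_concat]
    simp only [List.map_append, List.reverse_append, List.map_cons, List.map_nil,
      List.reverse_cons, List.reverse_nil, List.nil_append, List.cons_append]
    have h1k : 1 + k - 1 = k := by omega
    rw [h1k]
    simp only [pvGreedyA, pvGk]
    by_cases hle : pvF k ≤ m
    · have hge : (m : Int) - (pvF k : Int) ≥ 0 := by omega
      rw [if_pos hge]
      have hsub : (m : Int) - (pvF k : Int) = ((m - pvF k : Nat) : Int) := by push_cast [hle]; ring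
      rw [if_pos hle, hsub]
      by_cases hz : m - pvF k = 0
      · rw [if_pos hz, if_pos (by exact_mod_cast hz : ((m - pvF k : Nat) : Int) = 0)]
      · rw [if_neg hz, if_neg (by exact_mod_cast hz : ¬ ((m - pvF k : Nat) : Int) = 0)]
        exact ih (m - pvF k)
    · have hge : ¬ ((m : Int) - (pvF k : Int) ≥ 0) := by omega
      rw [if_neg hge, if_neg hle]
      by_cases hz : m = 0
      · rw [if_pos (by exact_mod_cast hz : ((m : Nat) : Int) = 0), if_pos hz]
      · rw [if_neg (by exact_mod_cast hz : ¬ ((m : Nat) : Int) = 0), if_neg hz]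
        exact ih m

-- ===== VERDICT (by name: the statement is the Claim_ definition above) =====
theorem factorial_sum_spec : Claim_equal_factorial_sum := by
  intro n _
  unfold Spec_factorial_sum factorial_sum factorial_sum_alt
  by_cases hn : n ≤ 0
  · rw [if_pos hn, pvBuildA, if_neg (by omega : ¬ (1 : Int) ≤ n)]
    rfl
  · rw [if_neg hn]
    have hN1 : 1 ≤ n.toNat := by omega
    have hn' : n = ((n.toNat : Nat) : Int) := by omega
    set N := n.toNat with hNdef
    set J := Nat.findGreatest (fun j => pvF j ≤ N) N with hJdef
    have hJ1 : pvF J ≤ N :=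
      Nat.findGreatest_spec (P := fun j => pvF j ≤ N) (Nat.zero_le N) (by simpa [pvF] using hN1)
    have hJ2 : N < pvF (J + 1) := by
      by_contra h
      rw [Nat.not_lt] at h
      have hle : J + 1 ≤ N := by
        have := pvF_ge (J + 1)
        omega
      exact Nat.findGreatest_is_greatest (P := fun j => pvF j ≤ N) (k := J + 1)
        (by omega) hle h
    have hbuild : pvBuildA (N : Int) 1 []
        = (List.range' 1 (J + 1)).map (fun k => (pvF (k - 1) : Int)) := by
      have := pvBuildA_inv N J hJ1 hJ2 (J + 1) 1 [] (by omega) (by omega)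
      simpa using this
    rw [hn', hbuild]
    exact pvGk_eq_loopB (J + 1) N hN1 hJ2 ▸ pvGreedyA_eq_gk (J + 1) N
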